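-- pv_equiv track=rewrite | github.com/reidm860/codeforces_problems | Hulk.py | get_feelings
-- ===== SOURCE A (Python) =====
-- def get_feelings(number):
--     love = 'I love'
--     hate = 'I hate'
--     that = 'that'
--     ending = 'it'
--     lst = []
--     for x in range(number):
--         if (x + 1) % 2 > 0:
--             lst.append(hate)
--             lst.append(that)
--         else:
--             lst.append(love)
--             lst.append(that)
--     del lst[-1]
--     lst.append(ending)
--     lst = ' '.join(lst)
--     return lst
-- ===== SOURCE B (Python) =====
-- def get_feelings(number):
--     feelings = ['I hate' if i % 2 == 0 else 'I love' for i in range(number)]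
--     result = feelings[0]
--     for f in feelings[1:]:
--         result += ' that ' + f
--     return result + ' it'
-- ===== Notes on version B (the rewrite author's own statement) =====
-- stated objective: simpler
-- what changed: B builds just the list of feelings and seeds the sentence with the first one, appending ' that ' + feeling for the rest, instead of A's interleave-'that'-tokens, delete-last, then space-join strategy.
import Mathlib
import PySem

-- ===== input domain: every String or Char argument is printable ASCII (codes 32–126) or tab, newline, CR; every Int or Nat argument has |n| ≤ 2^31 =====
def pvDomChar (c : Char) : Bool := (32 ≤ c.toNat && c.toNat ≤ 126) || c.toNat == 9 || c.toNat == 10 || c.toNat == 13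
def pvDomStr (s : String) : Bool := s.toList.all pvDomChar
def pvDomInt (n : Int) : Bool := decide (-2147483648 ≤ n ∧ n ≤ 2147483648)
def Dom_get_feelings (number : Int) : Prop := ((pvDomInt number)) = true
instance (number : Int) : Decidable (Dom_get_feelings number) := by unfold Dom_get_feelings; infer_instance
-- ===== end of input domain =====

-- B replaces A's interleave-"that"-tokens / delete-last / space-join strategy with a
-- sentence seeded by the first feeling and extended with " that " + feeling (objective: simpler).

-- ===== PORT A =====
def get_feelings (number : Int) : String :=
  let love := "I love"
  let hate := "I hate"
  let that := "that"
  let ending := "it"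
  let lst : List String :=
    (PySem.List.pyRange 0 number 1).foldl (fun lst x =>
      if PySem.Int.mod (x + 1) 2 > 0 then lst ++ [hate] ++ [that]
      else lst ++ [love] ++ [that]) []
  -- 'del lst[-1]' raises IndexError on the empty list (number ≤ 0); excluded by Pre_
  let lst := lst.dropLast
  let lst := lst ++ [ending]
  PySem.Str.join " " lst

-- ===== PORT B =====
def get_feelings_alt (number : Int) : String :=
  let feelings : List String :=
    (PySem.List.pyRange 0 number 1).map (fun i =>
      if PySem.Int.mod i 2 == 0 then "I hate" else "I love")
  -- 'feelings[0]' / 'feelings[1:]': IndexError on the empty list (number ≤ 0); excluded by Pre_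
  match feelings with
  | [] => ""
  | f0 :: rest => (rest.foldl (fun result f => result ++ " that " ++ f) f0) ++ " it"

-- ===== PRECONDITION & SPEC =====
-- Pre_ excludes number ≤ 0, where A's 'del lst[-1]' (and B's 'feelings[0]') raise IndexError.
def Pre_get_feelings (number : Int) : Prop := 1 ≤ number
instance (number : Int) : Decidable (Pre_get_feelings number) := by unfold Pre_get_feelings; infer_instance
def pvWitness_get_feelings : Int := (3)
def Spec_get_feelings (number : Int) (out : String) : Prop := out = get_feelings_alt number
instance (number : Int) (out : String) : Decidable (Spec_get_feelings number out) := by unfold Spec_get_feelings; infer_instance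

-- ===== CLAIM (what is proved, stated in full; the proofs are below) =====
def Claim_equal_get_feelings : Prop := ∀ (number : Int), Dom_get_feelings number → Pre_get_feelings number → Spec_get_feelings number (get_feelings number)

-- ===== LEMMAS AND PROOFS =====

-- The two elementwise tests agree: (i+1) % 2 > 0 ↔ i % 2 == 0 (Python-semantics mod).
theorem pv_feel_eq (i : Int) :
    (if PySem.Int.mod (i + 1) 2 > 0 then "I hate" else "I love")
      = (if PySem.Int.mod i 2 == 0 then "I hate" else "I love") := by
  have : (PySem.Int.mod (i + 1) 2 > 0) ↔ (PySem.Int.mod i 2 == 0) = true := by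
    simp only [PySem.Int.mod, beq_iff_eq]
    rw [Int.fmod_eq_emod, Int.fmod_eq_emod]
    omega
  split_ifs with h1 h2 h2 <;> first | rfl | (exact absurd (this.mp h1) h2) | (exact absurd (this.mpr h2) h1)

-- A's loop builds exactly the feelings list interleaved with "that" tokens.
theorem pv_loopA (number : Int) :
    ((PySem.List.pyRange 0 number 1).foldl (fun lst x =>
        if PySem.Int.mod (x + 1) 2 > 0 then lst ++ ["I hate"] ++ ["that"]
        else lst ++ ["I love"] ++ ["that"]) [])
    = ((PySem.List.pyRange 0 number 1).map (fun i =>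
        if PySem.Int.mod i 2 == 0 then "I hate" else "I love")).flatMap
        (fun f => [f, "that"]) := by
  have h : ∀ (l : List Int) (acc : List String),
      (l.foldl (fun lst x =>
        if PySem.Int.mod (x + 1) 2 > 0 then lst ++ ["I hate"] ++ ["that"]
        else lst ++ ["I love"] ++ ["that"]) acc)
      = acc ++ (l.map (fun i =>
          if PySem.Int.mod i 2 == 0 then "I hate" else "I love")).flatMap
          (fun f => [f, "that"]) := by
    intro l
    induction l with
    | nil => intro acc; simp
    | cons x t ih =>
      intro acc
      simp only [List.foldl_cons, List.map_cons, List.flatMap_cons, ih]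
      rw [show (if PySem.Int.mod (x + 1) 2 > 0 then acc ++ ["I hate"] ++ ["that"]
            else acc ++ ["I love"] ++ ["that"])
          = acc ++ [if PySem.Int.mod (x + 1) 2 > 0 then "I hate" else "I love", "that"] by
        split_ifs <;> simp]
      rw [pv_feel_eq]
      simp
  exact h _ []

-- Shifting a prefix out of B's accumulator.
theorem pv_foldl_shift (t : List String) (x y : String) :
    t.foldl (fun r f => r ++ " that " ++ f) (x ++ y)
      = x ++ t.foldl (fun r f => r ++ " that " ++ f) y := by
  induction t generalizing y with
  | nil => rfl
  | cons b t ih =>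
    simp only [List.foldl_cons]
    have e : x ++ y ++ " that " ++ b = x ++ (y ++ " that " ++ b) := by
      simp [String.append_assoc]
    rw [e, ih]

-- The bridge: space-joining the interleaved list with its last "that" dropped and "it"
-- appended equals B's seeded fold followed by " it".
theorem pv_join_eq (t : List String) (h : String) :
    PySem.Str.join " " (((h :: t).flatMap (fun f => [f, "that"])).dropLast ++ ["it"])
      = (t.foldl (fun r f => r ++ " that " ++ f) h) ++ " it" := by
  induction t generalizing h with
  | nil =>
    simp only [List.flatMap_cons, List.flatMap_nil]
    show PySem.Str.join " " [h, "it"] = h ++ " it"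
    simp [PySem.Str.join, PySem.Chars.join_cons_cons, PySem.Chars.join_singleton]
  | cons b t ih =>
    simp only [List.flatMap_cons, List.cons_append, List.nil_append]
    rw [List.dropLast_cons_of_ne_nil (by simp), List.dropLast_cons_of_ne_nil (by simp)]
    have hjoin2 : ∀ (a y : String) (r : List String),
        PySem.Str.join " " (a :: "that" :: y :: r)
          = a ++ " that " ++ PySem.Str.join " " (y :: r) := by
      intro a y r
      simp only [PySem.Str.join, List.map_cons, PySem.Chars.join_cons_cons,
        String.ofList_append, String.append_assoc]
      congr 1
      simp
    have hbcons : (b :: "that" :: t.flatMap (fun f => [f, "that"])).dropLast ++ ["it"]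
        = b :: (("that" :: t.flatMap (fun f => [f, "that"])).dropLast ++ ["it"]) := by
      rw [List.dropLast_cons_of_ne_nil (by simp)]
      simp
    simp only [List.cons_append]
    rw [hbcons, hjoin2, ← hbcons]
    have ih2 := ih b
    simp only [List.flatMap_cons, List.cons_append, List.nil_append] at ih2
    rw [ih2]
    simp only [List.foldl_cons]
    rw [show h ++ " that " ++ b = (h ++ " that ") ++ b from rfl,
      pv_foldl_shift t (h ++ " that ") b]
    simp [String.append_assoc]

-- ===== VERDICT (by name: the statement is the Claim_ definition above) =====
theorem get_feelings_spec : Claim_equal_get_feelings := by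
  intro number _ hpre
  unfold Spec_get_feelings get_feelings get_feelings_alt
  dsimp only
  have hlt : (0:Int) < number := hpre
  rw [pv_loopA, PySem.List.pyRange_one_cons hlt]
  simp only [List.map_cons]
  rw [pv_join_eq]
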